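-- pv_equiv track=rewrite | github.com/mbaljko/vault-grading-pipeline | 01_units/pipelines/pl1C_rubric_devt/python/generate-scoring-report_non_Layer0_consuming.py | classify_coarse_run_pattern
-- ===== SOURCE A (Python) =====
-- def classify_coarse_run_pattern(deltas: list[int]) -> str:
-- 	non_zero_deltas = [delta for delta in deltas if delta != 0]
-- 	if not non_zero_deltas:
-- 		return "flat"
-- 	if len(non_zero_deltas) == 1:
-- 		return "spike_up" if non_zero_deltas[0] > 0 else "spike_down"
-- 	if all(delta > 0 for delta in non_zero_deltas):
-- 		return "drifting_up"
-- 	if all(delta < 0 for delta in non_zero_deltas):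
-- 		return "drifting_down"
-- 	if any(delta > 0 for delta in non_zero_deltas) and any(delta < 0 for delta in non_zero_deltas):
-- 		return "reversal"
-- 	return "mixed"
-- ===== SOURCE B (Python) =====
-- def classify_coarse_run_pattern(deltas: list[int]) -> str:
--     pos = neg = 0
--     for d in deltas:
--         if d > 0:
--             pos += 1
--         elif d < 0:
--             neg += 1
--     if pos + neg == 0:
--         return "flat"
--     if pos + neg == 1:
--         return "spike_up" if pos == 1 else "spike_down"
--     if neg == 0:
--         return "drifting_up"
--     if pos == 0:
--         return "drifting_down"
--     return "reversal"
-- ===== Notes on version B (the rewrite author's own statement) =====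
-- stated objective: simpler
-- what changed: B classifies from two integer counters (positives/negatives) accumulated in one pass, instead of building a filtered list and scanning it repeatedly with all()/any(); the unreachable 'mixed' branch disappears.
import Mathlib
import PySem

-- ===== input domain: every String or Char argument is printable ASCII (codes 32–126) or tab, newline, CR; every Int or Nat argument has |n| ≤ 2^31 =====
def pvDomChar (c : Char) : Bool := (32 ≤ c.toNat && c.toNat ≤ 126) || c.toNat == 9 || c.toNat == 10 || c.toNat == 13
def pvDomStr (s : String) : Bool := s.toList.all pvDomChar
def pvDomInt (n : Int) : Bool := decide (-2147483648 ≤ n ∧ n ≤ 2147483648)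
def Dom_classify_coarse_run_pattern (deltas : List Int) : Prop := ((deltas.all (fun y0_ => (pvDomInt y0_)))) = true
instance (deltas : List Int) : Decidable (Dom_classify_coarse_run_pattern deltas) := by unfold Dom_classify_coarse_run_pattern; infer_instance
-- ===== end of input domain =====

-- B classifies from two sign counters accumulated in a single pass, instead of
-- building a filtered list and scanning it repeatedly with all()/any() (simpler).


-- ===== PORT A =====
def classify_coarse_run_pattern (deltas : List Int) : String :=
  let non_zero_deltas := deltas.filter (fun delta => delta != 0)
  if non_zero_deltas.isEmpty then "flat"
  else if non_zero_deltas.length == 1 then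
    -- index [0] is in range here (length = 1), so headD transcribes it exactly
    if non_zero_deltas.headD 0 > 0 then "spike_up" else "spike_down"
  else if non_zero_deltas.all (fun delta => delta > 0) then "drifting_up"
  else if non_zero_deltas.all (fun delta => delta < 0) then "drifting_down"
  else if non_zero_deltas.any (fun delta => delta > 0)
          && non_zero_deltas.any (fun delta => delta < 0) then "reversal"
  else "mixed"

-- ===== PORT B =====
def classify_coarse_run_pattern_alt (deltas : List Int) : String :=
  let pn : Int × Int := deltas.foldl
    (fun pn d => if d > 0 then (pn.1 + 1, pn.2) else if d < 0 then (pn.1, pn.2 + 1) else pn)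
    (0, 0)
  if pn.1 + pn.2 == 0 then "flat"
  else if pn.1 + pn.2 == 1 then (if pn.1 == 1 then "spike_up" else "spike_down")
  else if pn.2 == 0 then "drifting_up"
  else if pn.1 == 0 then "drifting_down"
  else "reversal"

-- ===== PRECONDITION & SPEC =====
def Spec_classify_coarse_run_pattern (deltas : List Int) (out : String) : Prop := out = classify_coarse_run_pattern_alt deltas
instance (deltas : List Int) (out : String) : Decidable (Spec_classify_coarse_run_pattern deltas out) := by unfold Spec_classify_coarse_run_pattern; infer_instance

-- ===== CLAIM (what is proved, stated in full; the proofs are below) =====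
def Claim_equal_classify_coarse_run_pattern : Prop := ∀ (deltas : List Int), Dom_classify_coarse_run_pattern deltas → Spec_classify_coarse_run_pattern deltas (classify_coarse_run_pattern deltas)

-- ===== LEMMAS AND PROOFS =====

-- number of positive / negative entries
def cntP (l : List Int) : Nat := l.countP (fun d => decide (0 < d))
def cntN (l : List Int) : Nat := l.countP (fun d => decide (d < 0))

theorem foldB (l : List Int) (a b : Int) :
    l.foldl (fun pn d => if d > 0 then (pn.1 + 1, pn.2) else if d < 0 then (pn.1, pn.2 + 1) else pn) (a, b)
      = (a + cntP l, b + cntN l) := by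
  induction l generalizing a b with
  | nil => simp [cntP, cntN]
  | cons x xs ih =>
    simp only [List.foldl_cons, cntP, cntN, List.countP_cons]
    by_cases hx : (0 : Int) < x
    · have : ¬ x < 0 := by omega
      simp [hx, this, ih, cntP, cntN]; omega
    · by_cases hn : x < 0
      · simp [hx, hn, ih, cntP, cntN]; omega
      · simp [hx, hn, ih, cntP, cntN]

theorem cnt_filter_P (l : List Int) : cntP (l.filter (fun d => d != 0)) = cntP l := by
  unfold cntP
  rw [List.countP_filter]
  congr 1
  funext a
  by_cases h : (0 : Int) < a <;> simp [h] ; omega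

theorem cnt_filter_N (l : List Int) : cntN (l.filter (fun d => d != 0)) = cntN l := by
  unfold cntN
  rw [List.countP_filter]
  congr 1
  funext a
  by_cases h : a < (0 : Int) <;> simp [h] ; omega

theorem len_nz (l : List Int) :
    (l.filter (fun d => d != 0)).length = cntP l + cntN l := by
  rw [← List.countP_eq_length_filter, ← cnt_filter_P l, ← cnt_filter_N l,
      cnt_filter_P, cnt_filter_N]
  induction l with
  | nil => simp [cntP, cntN]
  | cons x xs ih =>
    simp only [List.countP_cons, cntP, cntN] at *
    by_cases h0 : x = (0 : Int)
    · simp [h0, ih]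
    · rcases lt_or_gt_of_ne h0 with h | h
      · have : ¬ (0 : Int) < x := by omega
        simp [h0, h, this, ih]; omega
      · have : ¬ x < (0 : Int) := by omega
        simp [h0, h, this, ih]; omega

theorem classify_coarse_run_pattern_spec : Claim_equal_classify_coarse_run_pattern := by
  unfold Claim_equal_classify_coarse_run_pattern
  intro deltas _
  unfold Spec_classify_coarse_run_pattern classify_coarse_run_pattern classify_coarse_run_pattern_alt
  rw [foldB]
  set nz := deltas.filter (fun d => d != 0) with hnz
  have hlen : nz.length = cntP deltas + cntN deltas := len_nz deltas
  have hP : cntP nz = cntP deltas := cnt_filter_P deltas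
  have hN : cntN nz = cntN deltas := cnt_filter_N deltas
  have hmem : ∀ x ∈ nz, x ≠ 0 := by
    intro x hx
    have := (List.mem_filter.mp hx).2
    simpa using this
  simp only []
  by_cases hflat : cntP deltas + cntN deltas = 0
  · have : nz.isEmpty = true := by
      rw [List.isEmpty_iff, ← List.length_eq_zero_iff, hlen]; omega
    have h0 : cntP deltas = 0 ∧ cntN deltas = 0 := by omega
    simp [this, h0.1, h0.2]
  · have hne : nz.isEmpty = false := by
      rw [List.isEmpty_eq_false_iff_exists_mem]
      rcases List.exists_mem_of_length_pos (l := nz) (by omega) with ⟨x, hx⟩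
      exact ⟨x, hx⟩
    by_cases hone : cntP deltas + cntN deltas = 1
    · -- single nonzero element
      obtain ⟨x, hx⟩ := List.length_eq_one_iff.mp (by omega : nz.length = 1)
      have hxP : cntP [x] = cntP deltas := by rw [← hx, hP]
      have hxN : cntN [x] = cntN deltas := by rw [← hx, hN]
      by_cases hpos : (0 : Int) < x
      · have hp1 : cntP deltas = 1 := by
          rw [← hxP]; simp [cntP, hpos]
        have hn0 : cntN deltas = 0 := by omega
        simp [hx, hpos, hp1, hn0]
      · have hp0 : cntP deltas = 0 := by
          rw [← hxP]; simp [cntP, hpos]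
        have hn1 : cntN deltas = 1 := by omega
        simp [hx, hpos, hp0, hn1]
    · -- at least two nonzero elements
      have h1 : ¬ ((nz.length == 1) = true) := by simp [hlen]; omega
      have hsum0 : ¬ ((cntP deltas : Int) + (cntN deltas : Int) = 0) := by omega
      have hsum1 : ¬ ((cntP deltas : Int) + (cntN deltas : Int) = 1) := by omega
      by_cases hNz : cntN deltas = 0
      · -- all positive
        have hall : nz.all (fun delta => delta > 0) = true := by
          rw [List.all_eq_true]
          intro x hx
          have hx0 := hmem x hx
          have : ¬ x < 0 := by
            intro hlt
            have : 0 < cntN nz := List.countP_pos_iff.mpr ⟨x, hx, by simpa using hlt⟩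
            omega
          simp; omega
        have hp0 : ¬ cntP deltas = 0 := by omega
        have hp1 : ¬ cntP deltas = 1 := by omega
        simp [hne, h1, hall, hNz, hp0, hp1]
      · by_cases hPz : cntP deltas = 0
        · -- all negative
          have hall : nz.all (fun delta => delta < 0) = true := by
            rw [List.all_eq_true]
            intro x hx
            have hx0 := hmem x hx
            have : ¬ 0 < x := by
              intro hlt
              have : 0 < cntP nz := List.countP_pos_iff.mpr ⟨x, hx, by simpa using hlt⟩
              omega
            simp; omega
          have hnall : nz.all (fun delta => delta > 0) = false := by
            rcases List.countP_pos_iff.mp (by rw [hN]; omega : 0 < cntN nz) with ⟨x, hx, hxn⟩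
            rw [List.all_eq_false]
            exact ⟨x, hx, by simp at hxn ⊢; omega⟩
          have hn1 : ¬ cntN deltas = 1 := by omega
          simp [hne, h1, hall, hnall, hNz, hPz, hn1]
        · -- mixed: reversal
          rcases List.countP_pos_iff.mp (by rw [hP]; omega : 0 < cntP nz) with ⟨xp, hxp, hxp'⟩
          rcases List.countP_pos_iff.mp (by rw [hN]; omega : 0 < cntN nz) with ⟨xn, hxn, hxn'⟩
          have hnallP : nz.all (fun delta => delta > 0) = false := by
            rw [List.all_eq_false]; exact ⟨xn, hxn, by simp at hxn' ⊢; omega⟩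
          have hnallN : nz.all (fun delta => delta < 0) = false := by
            rw [List.all_eq_false]; exact ⟨xp, hxp, by simp at hxp' ⊢; omega⟩
          have hanyP : nz.any (fun delta => delta > 0) = true := by
            rw [List.any_eq_true]; exact ⟨xp, hxp, by simpa using hxp'⟩
          have hanyN : nz.any (fun delta => delta < 0) = true := by
            rw [List.any_eq_true]; exact ⟨xn, hxn, by simpa using hxn'⟩
          simp [hne, h1, hnallP, hnallN, hanyP, hanyN, hsum0, hsum1, hNz, hPz]
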